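-- pv_equiv track=rewrite | github.com/hyojeongchoi/AlgorithmTraining | 프로그래머스/2/17687. ［3차］ n진수 게임/［3차］ n진수 게임.py | solution
-- ===== SOURCE A (Python) =====
-- def solution(n, t, m, p):
--     def convert(num, base):
--         digits = "0123456789ABCDEF"
--         if num == 0:
--             return "0"
--         result = ""
--         while num > 0:
--             result = digits[num % base] + result
--             num //= base
--         return result
--
--     # 1. 전체 문자열 만들기 (t*m개 이상 확보)
--     s = ""
--     num = 0
--     while len(s) < t * m:
--         s += convert(num, n)
--         num += 1
--
--     # 2. 튜브 차례만 t개 뽑기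
--     answer = ""
--     for i in range(t):
--         answer += s[p - 1 + i * m]
--
--     return answer
-- ===== SOURCE B (Python) =====
-- def solution(n, t, m, p):
--     # Streams the base-n digits of 0,1,2,... most-significant-first, collecting a
--     # digit whenever the global position counter hits the next needed index
--     # p-1+k*m; no concatenated string is built and no second indexing pass runs.
--     digits = "0123456789ABCDEF"
--
--     def digs(num):
--         if num == 0:
--             return [digits[0]]
--         out = []
--         while num > 0:
--             out.append(digits[num % n])
--             num //= n
--         out.reverse()
--         return out
--
--     answer = []
--     pos = 0
--     need = p - 1
--     num = 0
--     while len(answer) < t: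
--         for c in digs(num):
--             if pos == need:
--                 answer.append(c)
--                 need += m
--                 if len(answer) == t:
--                     break
--             pos += 1
--         num += 1
--     return "".join(answer)
-- ===== Notes on version B (the rewrite author's own statement) =====
-- stated objective: alternative
-- what changed: B never materializes the concatenated game string: it streams the base-n digits of 0,1,2,... most-significant-first against a global position counter and collects a digit whenever the counter hits the next needed index p-1+k*m, stopping after t digits, whereas A first builds the whole >=t*m-character string and then indexes it in a second loop.
-- outside the precondition, e.g. on solution(17, 1, 1, 1): A returns '0', B returns '0'; on solution(2, 1, 1, 0): A returns '0', B does not finish within the time limit; on solution(2, 3, 1, 2): A returns '110', B returns '110'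
import Mathlib
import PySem

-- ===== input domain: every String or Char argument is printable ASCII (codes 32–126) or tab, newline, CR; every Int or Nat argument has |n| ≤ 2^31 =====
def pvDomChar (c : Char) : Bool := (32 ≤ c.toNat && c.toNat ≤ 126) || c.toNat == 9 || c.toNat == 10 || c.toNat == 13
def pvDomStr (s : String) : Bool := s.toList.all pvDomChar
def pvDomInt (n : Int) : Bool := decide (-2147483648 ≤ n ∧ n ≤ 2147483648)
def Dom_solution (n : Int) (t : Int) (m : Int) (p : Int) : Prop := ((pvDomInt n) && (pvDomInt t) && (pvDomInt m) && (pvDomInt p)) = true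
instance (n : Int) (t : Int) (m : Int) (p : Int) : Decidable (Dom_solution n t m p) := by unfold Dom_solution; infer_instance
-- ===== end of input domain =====

-- B streams the base-n digits of 0,1,2,… against a global position counter and collects a
-- digit whenever the counter hits the next needed index p-1+k*m (no concatenated string,
-- no second indexing pass); objective: alternative (same cost, different structure).

-- ===== PORT A =====
-- digits = "0123456789ABCDEF"
def pvDigits : List Char := "0123456789ABCDEF".toList

-- `while num > 0: result = digits[num % base] + result; num //= base`; the fuel only
-- bounds the loop for totality (num.toNat iterations suffice on every admitted input);
-- `digits[…]` is pyGetD with a junk default — exact wherever Python does not raise.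
def pvConvLoop (base : Int) : Nat → Int → List Char → List Char
  | 0, _, result => result
  | fuel+1, num, result =>
    if 0 < num then
      pvConvLoop base fuel (PySem.Int.floordiv num base)
        (PySem.List.pyGetD pvDigits (PySem.Int.mod num base) '?' :: result)
    else result

def pvConvert (num base : Int) : List Char :=
  if num = 0 then ['0'] else pvConvLoop base num.toNat num []

-- `while len(s) < t * m: s += convert(num, n); num += 1`; fuel (t*m).toNat suffices since
-- every convert contributes at least one character.
def pvBuildLoop (n tm : Int) : Nat → List Char → Int → List Char
  | 0, s, _ => s
  | fuel+1, s, num =>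
    if (s.length : Int) < tm then pvBuildLoop n tm fuel (s ++ pvConvert num n) (num + 1)
    else s

def solution (n : Int) (t : Int) (m : Int) (p : Int) : String :=
  let s := pvBuildLoop n (t * m) (t * m).toNat [] 0
  let answer := (PySem.List.pyRange 0 t 1).foldl
    (fun acc i => acc ++ [PySem.List.pyGetD s (p - 1 + i * m) '?']) []
  String.ofList answer

-- ===== PORT B =====
-- `while num > 0: out.append(digits[num % n]); num //= n` (reversed afterwards in pvDigs).
def pvDigsLoop (n : Int) : Nat → Int → List Char → List Char
  | 0, _, out => out
  | fuel+1, num, out =>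
    if 0 < num then
      pvDigsLoop n fuel (PySem.Int.floordiv num n)
        (out ++ [PySem.List.pyGetD pvDigits (PySem.Int.mod num n) '?'])
    else out

-- digs(num): most-significant-first digit list of num; digits[0] = '0'
def pvDigs (n num : Int) : List Char :=
  if num = 0 then ['0'] else (pvDigsLoop n num.toNat num []).reverse

-- `for c in digs(num): if pos == need: answer.append(c); need += m; if len(answer) == t: break
--  pos += 1`  — returns the updated (answer, pos, need)
def pvScan (t mm : Int) : List Char → List Char → Int → Int → List Char × Int × Int
  | [], ans, pos, need => (ans, pos, need)
  | c :: ds, ans, pos, need =>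
    if pos = need then
      if ((ans.length + 1 : Nat) : Int) = t then (ans ++ [c], pos, need + mm)  -- break
      else pvScan t mm ds (ans ++ [c]) (pos + 1) (need + mm)
    else pvScan t mm ds ans (pos + 1) need

-- `while len(answer) < t: <scan digs(num)>; num += 1`; fuel (t*m).toNat suffices since each
-- number contributes at least one position and every needed index is below t*m.
def pvOuter (n t mm : Int) : Nat → Int → List Char × Int × Int → List Char
  | 0, _, st => st.1
  | fuel+1, num, st =>
    if (st.1.length : Int) < t then
      pvOuter n t mm fuel (num + 1) (pvScan t mm (pvDigs n num) st.1 st.2.1 st.2.2)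
    else st.1

def solution_alt (n : Int) (t : Int) (m : Int) (p : Int) : String :=
  String.ofList (pvOuter n t m (t * m).toNat 0 ([], 0, p - 1))

-- ===== PRECONDITION & SPEC =====
-- Pre_ excludes exactly the corners where A raises or diverges (base 0/1 and |n| ≥ 18 as
-- soon as the string build needs a digit ≥ 16, n ≥ 17 once it needs the 17th character,
-- p outside 1..m once an index leaves s) or where A's returned value is an artefact of its
-- implementation (p ≤ 0 negative-index wraparound, p > m indexing the accidental overshoot
-- of s); the t ≤ 0 branch keeps every degenerate input whose build loop provably completes.
def Pre_solution (n : Int) (t : Int) (m : Int) (p : Int) : Prop :=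
  (t ≤ 0 ∧ (0 ≤ m ∨ t * m ≤ 1 ∨ (-17 ≤ n ∧ n ≤ -1) ∨ (2 ≤ n ∧ n ≤ 16) ∨
            (17 ≤ n ∧ t * m ≤ 16))) ∨
  (((-17 ≤ n ∧ n ≤ -1) ∨ (2 ≤ n ∧ n ≤ 16)) ∧ 1 ≤ t ∧ 1 ≤ m ∧ 1 ≤ p ∧ p ≤ m)
instance (n : Int) (t : Int) (m : Int) (p : Int) : Decidable (Pre_solution n t m p) := by
  unfold Pre_solution; infer_instance

def pvWitness_solution : Int × Int × Int × Int := (2, 4, 2, 1)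

def Spec_solution (n : Int) (t : Int) (m : Int) (p : Int) (out : String) : Prop :=
  out = solution_alt n t m p
instance (n : Int) (t : Int) (m : Int) (p : Int) (out : String) : Decidable (Spec_solution n t m p out) := by
  unfold Spec_solution; infer_instance

-- ===== CLAIM (what is proved, stated in full; the proofs are below) =====
def Claim_equal_solution : Prop := ∀ (n : Int) (t : Int) (m : Int) (p : Int),
  Dom_solution n t m p → Pre_solution n t m p → Spec_solution n t m p (solution n t m p)

-- ===== LEMMAS AND PROOFS =====

-- the stream: concatenation of the digit strings of 0,1,…,k-1
def pvF (n : Int) : Nat → List Char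
  | 0 => []
  | k+1 => pvF n k ++ pvConvert (k : Int) n

-- the stream's character at a global position
def pvSV (n : Int) (idx : Nat) : Char := (pvF n (idx + 1)).getD idx '?'

theorem pvConvLoop_acc (base : Int) :
    ∀ (fuel : Nat) (num : Int) (res : List Char),
      pvConvLoop base fuel num res = pvConvLoop base fuel num [] ++ res := by
  intro fuel
  induction fuel with
  | zero => intro num res; simp [pvConvLoop]
  | succ f ih =>
    intro num res
    by_cases h : 0 < num
    · simp only [pvConvLoop, if_pos h]
      rw [ih, ih (PySem.Int.floordiv num base)
        [PySem.List.pyGetD pvDigits (PySem.Int.mod num base) '?']]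
      simp
    · simp [pvConvLoop, h]

theorem pvDigsLoop_eq_rev (n : Int) :
    ∀ (fuel : Nat) (num : Int) (out : List Char),
      pvDigsLoop n fuel num out = out ++ (pvConvLoop n fuel num []).reverse := by
  intro fuel
  induction fuel with
  | zero => intro num out; simp [pvDigsLoop, pvConvLoop]
  | succ f ih =>
    intro num out
    by_cases h : 0 < num
    · simp only [pvDigsLoop, pvConvLoop, if_pos h]
      rw [ih, pvConvLoop_acc n f (PySem.Int.floordiv num n)
        [PySem.List.pyGetD pvDigits (PySem.Int.mod num n) '?']]
      simp
    · simp [pvDigsLoop, pvConvLoop, h]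

theorem pvDigs_eq_convert (n num : Int) : pvDigs n num = pvConvert num n := by
  unfold pvDigs pvConvert
  by_cases h : num = 0
  · simp [h]
  · simp [h, pvDigsLoop_eq_rev]

theorem pvConvert_ne_nil (n num : Int) (h : 0 ≤ num) : pvConvert num n ≠ [] := by
  unfold pvConvert
  by_cases h0 : num = 0
  · simp [h0]
  · have hpos : 0 < num := lt_of_le_of_ne h (Ne.symm h0)
    have h1 : num.toNat = (num.toNat - 1) + 1 := by omega
    rw [if_neg h0, h1]
    simp only [pvConvLoop, if_pos hpos]
    rw [pvConvLoop_acc]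
    simp

theorem pvF_len_ge (n : Int) : ∀ k : Nat, k ≤ (pvF n k).length := by
  intro k
  induction k with
  | zero => simp [pvF]
  | succ k ih =>
    have h := pvConvert_ne_nil n (k : Int) (by positivity)
    have : 1 ≤ (pvConvert (k : Int) n).length := by
      cases hc : pvConvert (k : Int) n with
      | nil => exact absurd hc h
      | cons a l => simp
    simp only [pvF, List.length_append]
    omega

theorem pvF_len_mono (n : Int) {a b : Nat} (h : a ≤ b) :
    (pvF n a).length ≤ (pvF n b).length := by
  induction b with
  | zero => simp_all
  | succ b ih =>
    rcases Nat.lt_or_ge a (b+1) with hlt | hge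
    · have := ih (by omega)
      simp only [pvF, List.length_append]; omega
    · have : a = b + 1 := by omega
      simp [this]

theorem pvF_getD_stable (n : Int) {a b : Nat} (h : a ≤ b) {idx : Nat}
    (hidx : idx < (pvF n a).length) :
    (pvF n b).getD idx '?' = (pvF n a).getD idx '?' := by
  induction b with
  | zero =>
    have : a = 0 := by omega
    simp [this]
  | succ b ih =>
    rcases Nat.lt_or_ge a (b+1) with hlt | hge
    · have hab : a ≤ b := by omega
      rw [← ih hab]
      have hlen : idx < (pvF n b).length := lt_of_lt_of_le hidx (pvF_len_mono n hab)
      simp only [pvF]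
      rw [List.getD_eq_getElem?_getD, List.getD_eq_getElem?_getD,
          List.getElem?_append_left hlen]
    · have : a = b + 1 := by omega
      simp [this]

theorem pvF_getD_sv (n : Int) {N idx : Nat} (hidx : idx < (pvF n N).length) :
    (pvF n N).getD idx '?' = pvSV n idx := by
  unfold pvSV
  rcases Nat.lt_or_ge N (idx+1) with h | h
  · exact (pvF_getD_stable n (by omega) hidx).symm
  · have hidx' : idx < (pvF n (idx+1)).length :=
      lt_of_lt_of_le (by omega) (pvF_len_ge n (idx+1))
    exact pvF_getD_stable n h hidx'

-- the characters of convert(num) sit at global positions len(pvF num) + j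
theorem pvConvert_window (n : Int) (num : Nat) :
    ∀ j, j < (pvConvert (num : Int) n).length →
      (pvConvert (num : Int) n).getD j '?' = pvSV n ((pvF n num).length + j) := by
  intro j hj
  have hlen : (pvF n num).length + j < (pvF n (num+1)).length := by
    show (pvF n num).length + j < (pvF n num ++ pvConvert (num : Int) n).length
    rw [List.length_append]
    omega
  rw [← pvF_getD_sv n hlen]
  show _ = (pvF n num ++ pvConvert (num : Int) n).getD ((pvF n num).length + j) '?'
  rw [List.getD_eq_getElem?_getD, List.getD_eq_getElem?_getD,
      List.getElem?_append_right (by omega)]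
  congr 2
  omega

-- A's build loop returns pvF N for some N with length ≥ t*m
theorem pvBuildLoop_spec (n tm : Int) :
    ∀ (fuel num : Nat), tm.toNat ≤ num + fuel →
      ∃ N : Nat, pvBuildLoop n tm fuel (pvF n num) (num : Int) = pvF n N ∧
        tm ≤ ((pvF n N).length : Int) := by
  intro fuel
  induction fuel with
  | zero =>
    intro num h
    refine ⟨num, rfl, ?_⟩
    have := pvF_len_ge n num
    omega
  | succ f ih =>
    intro num h
    by_cases hlt : ((pvF n num).length : Int) < tm
    · rw [pvBuildLoop, if_pos hlt]
      have h1 : (pvF n num ++ pvConvert (num : Int) n) = pvF n (num+1) := rfl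
      have h2 : ((num : Int) + 1) = ((num + 1 : Nat) : Int) := by push_cast; ring
      rw [h1, h2]
      exact ih (num+1) (by omega)
    · rw [pvBuildLoop, if_neg hlt]
      exact ⟨num, rfl, by omega⟩

-- A's result, characterized
theorem solutionA_char (n t m p : Int)
    (ht : 1 ≤ t) (hm : 1 ≤ m) (hp : 1 ≤ p) (hpm : p ≤ m) :
    solution n t m p =
      String.ofList ((List.range t.toNat).map
        (fun (k : Nat) => pvSV n (p - 1 + (k : Int) * m).toNat)) := by
  obtain ⟨N, hN, hlen⟩ := pvBuildLoop_spec n (t*m) (t*m).toNat 0 (by omega)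
  have hN' : pvBuildLoop n (t*m) (t*m).toNat [] (0 : Int) = pvF n N := by
    have h0 : pvF n 0 = [] := rfl
    rw [← h0]
    exact_mod_cast hN
  unfold solution
  simp only [hN']
  rw [PySem.List.pyRange_one, PySem.List.foldl_append_singleton_eq_map, List.map_map]
  simp only [List.nil_append, sub_zero]
  congr 1
  apply List.map_congr_left
  intro k hk
  have hk' : (k : Int) ≤ t - 1 := by
    have := List.mem_range.mp hk
    omega
  have hkm0 : 0 ≤ (k : Int) * m := mul_nonneg (by positivity) (by omega)
  have hkmt : (k : Int) * m ≤ (t - 1) * m := mul_le_mul_of_nonneg_right hk' (by omega)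
  have h1 : 0 ≤ p - 1 + (k : Int) * m := by omega
  have h2 : p - 1 + (k : Int) * m < ((pvF n N).length : Int) := by nlinarith
  show PySem.List.pyGetD (pvF n N) (p - 1 + (0 + (k : Int)) * m) '?' = _
  rw [zero_add, PySem.List.pyGetD_eq_getElem (pvF n N) '?' h1 h2]
  have h3 : (p - 1 + (k : Int) * m).toNat < (pvF n N).length := by omega
  rw [← pvF_getD_sv n h3]
  exact (List.getD_eq_getElem _ _ h3).symm

-- B's scan: picks up exactly the stream characters at the needed indices in its window
theorem pvScan_spec (n t m p : Int) (hm : 1 ≤ m) :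
    ∀ (ds ans : List Char) (pos : Nat) (need : Int),
      ans = (List.range ans.length).map (fun (k : Nat) => pvSV n (p - 1 + (k : Int) * m).toNat) →
      need = p - 1 + (ans.length : Int) * m →
      ans.length < t.toNat →
      (pos : Int) ≤ need →
      (∀ j, j < ds.length → ds.getD j '?' = pvSV n (pos + j)) →
      (pvScan t m ds ans pos need).1 =
          (List.range (pvScan t m ds ans pos need).1.length).map
            (fun (k : Nat) => pvSV n (p - 1 + (k : Int) * m).toNat) ∧
        (pvScan t m ds ans pos need).2.2 =
          p - 1 + ((pvScan t m ds ans pos need).1.length : Int) * m ∧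
        (pvScan t m ds ans pos need).1.length ≤ t.toNat ∧
        ((pvScan t m ds ans pos need).1.length < t.toNat →
          (pvScan t m ds ans pos need).2.1 = ((pos + ds.length : Nat) : Int) ∧
          (pvScan t m ds ans pos need).2.1 ≤ (pvScan t m ds ans pos need).2.2) := by
  intro ds
  induction ds with
  | nil =>
    intro ans pos need h2 h3 hlt hpn _
    simp only [pvScan]
    exact ⟨h2, h3, by omega, fun _ => ⟨by norm_num, hpn⟩⟩
  | cons c ds ih =>
    intro ans pos need h2 h3 hlt hpn hw
    by_cases hpe : (pos : Int) = need
    · -- pick this character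
      have hc : c = pvSV n pos := by
        have := hw 0 (by simp)
        simpa using this
      have hcn : c = pvSV n (p - 1 + (ans.length : Int) * m).toNat := by
        rw [hc]
        congr 1
        omega
      have h2' : ans ++ [c] =
          (List.range (ans ++ [c]).length).map
            (fun (k : Nat) => pvSV n (p - 1 + (k : Int) * m).toNat) := by
        rw [List.length_append, List.length_singleton, List.range_succ, List.map_append, ← h2]
        simpa using hcn
      have h3' : need + m = p - 1 + (((ans ++ [c]).length : Nat) : Int) * m := by
        rw [h3, List.length_append, List.length_singleton]
        push_cast
        ring
      by_cases hbr : ((ans.length + 1 : Nat) : Int) = t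
      · -- break: answer is full
        have hfull : (ans ++ [c]).length = t.toNat := by
          rw [List.length_append, List.length_singleton]
          omega
        simp only [pvScan, if_pos hpe, if_pos hbr]
        exact ⟨h2', h3', by omega, fun hcontr => by omega⟩
      · -- continue scanning after the pick
        have hlt' : (ans ++ [c]).length < t.toNat := by
          rw [List.length_append, List.length_singleton]
          omega
        have hpn' : ((pos + 1 : Nat) : Int) ≤ need + m := by push_cast; omega
        have hw' : ∀ j, j < ds.length → ds.getD j '?' = pvSV n ((pos + 1) + j) := by
          intro j hj
          have := hw (j + 1) (by simpa using hj)
          simpa [Nat.add_assoc, Nat.add_comm 1 j] using this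
        have hrec := ih (ans ++ [c]) (pos + 1) (need + m) h2' h3' hlt' hpn' hw'
        have hcast : ((pos : Int) + 1) = ((pos + 1 : Nat) : Int) := by push_cast; ring
        simp only [pvScan, if_pos hpe, if_neg hbr, hcast]
        refine ⟨hrec.1, hrec.2.1, hrec.2.2.1, fun hl => ?_⟩
        obtain ⟨hpos', hle'⟩ := hrec.2.2.2 hl
        refine ⟨?_, hle'⟩
        rw [hpos']
        push_cast [List.length_cons]
        ring
    · -- skip this character
      have hpn' : ((pos + 1 : Nat) : Int) ≤ need := by push_cast; omega
      have hw' : ∀ j, j < ds.length → ds.getD j '?' = pvSV n ((pos + 1) + j) := by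
        intro j hj
        have := hw (j + 1) (by simpa using hj)
        simpa [Nat.add_assoc, Nat.add_comm 1 j] using this
      have hrec := ih ans (pos + 1) need h2 h3 hlt hpn' hw'
      have hcast : ((pos : Int) + 1) = ((pos + 1 : Nat) : Int) := by push_cast; ring
      simp only [pvScan, if_neg hpe, hcast]
      refine ⟨hrec.1, hrec.2.1, hrec.2.2.1, fun hl => ?_⟩
      obtain ⟨hpos', hle'⟩ := hrec.2.2.2 hl
      refine ⟨?_, hle'⟩
      rw [hpos']
      push_cast [List.length_cons]
      ring

-- B's outer loop produces all t selected stream characters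
theorem pvOuter_spec (n t m p : Int)
    (ht : 1 ≤ t) (hm : 1 ≤ m) (_hp : 1 ≤ p) (hpm : p ≤ m) :
    ∀ (fuel num : Nat) (st : List Char × Int × Int),
      (t * m).toNat ≤ num + fuel →
      st.1 = (List.range st.1.length).map (fun (k : Nat) => pvSV n (p - 1 + (k : Int) * m).toNat) →
      st.1.length ≤ t.toNat →
      (st.1.length < t.toNat →
        st.2.2 = p - 1 + (st.1.length : Int) * m ∧
        st.2.1 = ((pvF n num).length : Int) ∧ st.2.1 ≤ st.2.2) →
      pvOuter n t m fuel (num : Int) st =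
        (List.range t.toNat).map (fun (k : Nat) => pvSV n (p - 1 + (k : Int) * m).toNat) := by
  have hfull : ∀ (st : List Char × Int × Int) (num : Nat),
      (t * m).toNat ≤ num →
      st.1.length ≤ t.toNat →
      (st.1.length < t.toNat →
        st.2.2 = p - 1 + (st.1.length : Int) * m ∧
        st.2.1 = ((pvF n num).length : Int) ∧ st.2.1 ≤ st.2.2) →
      st.1.length = t.toNat := by
    intro st num hnum hle hinv
    by_contra hne
    have hlt : st.1.length < t.toNat := by omega
    obtain ⟨hneed, hpos, hle2⟩ := hinv hlt
    have hL : ((st.1.length : Nat) : Int) ≤ t - 1 := by omega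
    have hLm : (st.1.length : Int) * m ≤ (t - 1) * m :=
      mul_le_mul_of_nonneg_right hL (by omega)
    have hneedlt : st.2.2 ≤ t * m - 1 := by nlinarith
    have hlen := pvF_len_ge n num
    have htm : ((t * m).toNat : Int) = t * m := Int.toNat_of_nonneg (by positivity)
    have : t * m ≤ st.2.1 := by
      rw [hpos]
      omega
    omega
  intro fuel
  induction fuel with
  | zero =>
    intro num st h hmap hle hinv
    have := hfull st num (by omega) hle hinv
    show st.1 = _
    rw [hmap, this]
  | succ f ih =>
    intro num st h hmap hle hinv
    by_cases hcond : ((st.1.length : Nat) : Int) < t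
    · have hlt : st.1.length < t.toNat := by omega
      obtain ⟨hneed, hpos, hle2⟩ := hinv hlt
      rw [pvOuter, if_pos hcond]
      have hwind : ∀ j, j < (pvDigs n (num : Int)).length →
          (pvDigs n (num : Int)).getD j '?' = pvSV n ((pvF n num).length + j) := by
        rw [pvDigs_eq_convert]
        exact pvConvert_window n num
      have hscan := pvScan_spec n t m p hm (pvDigs n (num : Int)) st.1
        ((pvF n num).length) st.2.2 hmap hneed hlt (by rw [← hpos]; exact hle2) hwind
      have hst : pvScan t m (pvDigs n (num : Int)) st.1 st.2.1 st.2.2 =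
          pvScan t m (pvDigs n (num : Int)) st.1 (((pvF n num).length : Nat) : Int) st.2.2 := by
        rw [hpos]
      rw [hst]
      have hcast : ((num : Int) + 1) = ((num + 1 : Nat) : Int) := by push_cast; ring
      rw [hcast]
      apply ih (num + 1) _ (by omega) hscan.1 hscan.2.2.1
      intro hl
      obtain ⟨hpos', hle'⟩ := hscan.2.2.2 hl
      refine ⟨hscan.2.1, ?_, hle'⟩
      rw [hpos']
      congr 1
      show ((pvF n num).length + (pvDigs n (num : Int)).length : Nat) = (pvF n (num+1)).length
      rw [pvDigs_eq_convert]
      show _ = (pvF n num ++ pvConvert (num : Int) n).length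
      rw [List.length_append]
    · rw [pvOuter, if_neg hcond]
      have : st.1.length = t.toNat := by omega
      rw [hmap, this]

-- B's result, characterized
theorem solutionB_char (n t m p : Int)
    (ht : 1 ≤ t) (hm : 1 ≤ m) (hp : 1 ≤ p) (hpm : p ≤ m) :
    solution_alt n t m p =
      String.ofList ((List.range t.toNat).map
        (fun (k : Nat) => pvSV n (p - 1 + (k : Int) * m).toNat)) := by
  unfold solution_alt
  congr 1
  have h0 : ((0 : Nat) : Int) = (0 : Int) := rfl
  rw [← h0]
  apply pvOuter_spec n t m p ht hm hp hpm (t * m).toNat 0 ([], 0, p - 1) (by omega)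
  · simp
  · simp
  · intro h
    refine ⟨by simp, rfl, by simp; omega⟩

-- ===== VERDICT (by name: the statement is the Claim_ definition above) =====
theorem solution_spec : Claim_equal_solution := by
  intro n t m p _ hpre
  unfold Spec_solution
  rcases hpre with ⟨ht, -⟩ | ⟨_, ht, hm, hp, hpm⟩
  · -- degenerate t ≤ 0: A selects nothing from s, B collects nothing — both return ""
    have hr : PySem.List.pyRange 0 t 1 = [] := PySem.List.pyRange_one_eq_nil ht
    unfold solution solution_alt
    rw [hr]
    cases htm : (t * m).toNat with
    | zero => simp [pvOuter]
    | succ f => simp [pvOuter, show ¬((0 : Int) < t) by omega]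
  · rw [solutionA_char n t m p ht hm hp hpm, solutionB_char n t m p ht hm hp hpm]
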